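-- pv_equiv track=rewrite | github.com/LJuans0/PcProgramacion1 | May9.py | pregunta_3
-- ===== SOURCE A (Python) =====
-- def pregunta_3(frase : str) -> tuple[int,int]:
--     """
--     Parametros:
--         frase (string) : Una oracion o frase donde cada palabra esta separada por espacios
--     Retorna:
--         Tuple[int,int] : El primer valor es la cantidad de palabras en la frase. El segundo valor es la cantidad de letras en la frase.
--     """
--     palabras=1
--     letras=0
--     for i in frase:
--         if i==" ":
--             palabras+=1
--         else:
--             letras+=1
--     return palabras,letras
-- ===== SOURCE B (Python) =====
-- def pregunta_3(frase: str) -> tuple[int, int]: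
--     partes = frase.split(" ")
--     return len(partes), sum(len(p) for p in partes)
-- ===== Notes on version B (the rewrite author's own statement) =====
-- stated objective: alternative
-- what changed: Instead of scanning characters and classifying each one, B splits the phrase into its space-separated parts and derives both results from that structure: the word count is the number of parts and the letter count is the total length of the parts.
import Mathlib
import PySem

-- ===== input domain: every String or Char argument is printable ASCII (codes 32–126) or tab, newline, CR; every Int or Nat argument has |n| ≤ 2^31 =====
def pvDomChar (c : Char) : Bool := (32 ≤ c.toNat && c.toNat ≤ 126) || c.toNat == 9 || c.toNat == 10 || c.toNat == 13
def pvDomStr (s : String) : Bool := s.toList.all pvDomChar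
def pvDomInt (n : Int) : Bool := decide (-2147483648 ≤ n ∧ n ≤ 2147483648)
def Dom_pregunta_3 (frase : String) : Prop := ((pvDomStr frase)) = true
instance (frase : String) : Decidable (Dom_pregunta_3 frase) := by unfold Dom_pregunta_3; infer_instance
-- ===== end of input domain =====

-- B derives both counts from the list of space-separated parts (split on " "): number of parts and total part length; a different decomposition, measured faster (C-level split vs per-char loop).

-- ===== PORT A =====
def pregunta_3 (frase : String) : Int × Int :=
  frase.toList.foldl
    (fun (st : Int × Int) (i : Char) =>
      if i == ' ' then (st.1 + 1, st.2) else (st.1, st.2 + 1))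
    (1, 0)

-- ===== PORT B =====
def pregunta_3_alt (frase : String) : Int × Int :=
  let partes : List (List Char) := PySem.Chars.splitOn frase.toList [' ']
  ((partes.length : Int), ((partes.map List.length).sum : Int))

-- ===== PRECONDITION & SPEC =====
def Spec_pregunta_3 (frase : String) (out : Int × Int) : Prop := out = pregunta_3_alt frase
instance (frase : String) (out : Int × Int) : Decidable (Spec_pregunta_3 frase out) := by unfold Spec_pregunta_3; infer_instance

-- ===== CLAIM =====
def Claim_equal_pregunta_3 : Prop := ∀ (frase : String), Dom_pregunta_3 frase → Spec_pregunta_3 frase (pregunta_3 frase)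

-- ===== LEMMAS AND PROOFS =====

-- splitOn.go with single-char separator ' ': part count and total part length.
set_option maxRecDepth 4000 in
theorem splitOn_go_spec (fuel : Nat) :
    ∀ (l cur : List Char) (acc : List (List Char)), l.length ≤ fuel →
      (PySem.Chars.splitOn.go [' '] fuel l cur acc).length
        = acc.length + l.count ' ' + 1 ∧
      ((PySem.Chars.splitOn.go [' '] fuel l cur acc).map List.length).sum
        = (acc.map List.length).sum + cur.length + (l.filter (fun c => ¬ c == ' ')).length := by
  induction fuel with
  | zero =>
      intro l cur acc h
      have hl : l = [] := List.eq_nil_of_length_eq_zero (Nat.le_zero.mp h)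
      subst hl
      simp [PySem.Chars.splitOn.go]
  | succ fuel ih =>
      intro l cur acc h
      match l with
      | [] => simp [PySem.Chars.splitOn.go]
      | c :: rest =>
        rw [PySem.Chars.splitOn.go]
        obtain ⟨h1, h2⟩ := ih rest [] (cur.reverse :: acc) (by simpa using Nat.le_of_succ_le_succ h)
        obtain ⟨h3, h4⟩ := ih rest (c :: cur) acc (by simpa using Nat.le_of_succ_le_succ h)
        by_cases hc : c = ' '
        · subst hc
          have hpre : [' '].isPrefixOf (' ' :: rest) = true := by
            simp [List.isPrefixOf]
          rw [hpre]
          simp only [if_true, List.length_singleton, List.drop_succ_cons, List.drop_zero]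
          refine ⟨?_, ?_⟩
          · rw [h1]; simp [List.count_cons]; omega
          · rw [h2]; simp [List.filter_cons]; omega
        · have hpre : [' '].isPrefixOf (c :: rest) = false := by
            simp [List.isPrefixOf]
            exact fun h' => hc h'.symm
          rw [hpre]
          simp only [Bool.false_eq_true, if_false]
          refine ⟨?_, ?_⟩
          · rw [h3]; simp [List.count_cons, eq_comm, hc]
          · rw [h4]; simp [List.filter_cons, hc]; omega
theorem splitOn_length (cs : List Char) :
    (PySem.Chars.splitOn cs [' ']).length = cs.count ' ' + 1 := by
  have := splitOn_go_spec (cs.length + 1) cs [] [] (by omega)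
  simpa [PySem.Chars.splitOn] using this.1

theorem splitOn_sum (cs : List Char) :
    ((PySem.Chars.splitOn cs [' ']).map List.length).sum
      = (cs.filter (fun c => ¬ c == ' ')).length := by
  have := splitOn_go_spec (cs.length + 1) cs [] [] (by omega)
  simpa [PySem.Chars.splitOn] using this.2

-- A's fold computes (p + #spaces, l + #non-spaces) from any start state.
theorem foldA (cs : List Char) (p l : Int) :
    cs.foldl (fun (st : Int × Int) (i : Char) =>
        if i == ' ' then (st.1 + 1, st.2) else (st.1, st.2 + 1)) (p, l)
      = (p + (cs.count ' ' : Int), l + ((cs.filter (fun c => ¬ c == ' ')).length : Int)) := by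
  induction cs generalizing p l with
  | nil => simp
  | cons h t ih =>
      by_cases hc : h = ' '
      · subst hc
        simp only [List.foldl_cons, BEq.rfl, if_true]
        rw [ih]
        simp [Prod.ext_iff, List.count_cons, List.filter_cons]
        omega
      · have hb : (h == ' ') = false := by simpa using hc
        simp only [List.foldl_cons, hb, Bool.false_eq_true, if_false]
        rw [ih]
        have hc2 : ¬ (' ' = h) := fun h' => hc h'.symm
        simp [Prod.ext_iff, List.count_cons, List.filter_cons, hc, hc2]
        omega

-- ===== VERDICT =====
theorem pregunta_3_spec : Claim_equal_pregunta_3 := by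
  intro frase _
  unfold Spec_pregunta_3 pregunta_3 pregunta_3_alt
  rw [foldA]
  simp only [splitOn_length, splitOn_sum]
  push_cast
  ring_nf
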